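-- pv_equiv track=rewrite | github.com/MYK-Y69/PromptHub | tools/import_sheets.py | resolve_category
-- ===== SOURCE A (Python) =====
-- def resolve_category(data: dict, value: str) -> dict | None:
--     """カテゴリを ID または日本語ラベルで検索する。"""
--     v = value.strip()
--     if not v:
--         return None
--     # 1) ID 完全一致
--     for cat in data["categories"]:
--         if cat["id"] == v:
--             return cat
--     # 2) ラベル完全一致（大文字小文字・前後空白無視）
--     v_lower = v.lower()
--     for cat in data["categories"]:
--         if cat.get("label", "").strip().lower() == v_lower:
--             return cat
--     return None
-- ===== SOURCE B (Python) =====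
-- def resolve_category(data: dict, value: str) -> dict | None:
--     """Build first-wins lookup tables keyed by id and by normalized label, then look up."""
--     v = value.strip()
--     if not v:
--         return None
--     by_id = {}
--     by_label = {}
--     for cat in data["categories"]:
--         k = cat.get("id", "")
--         if k not in by_id:
--             by_id[k] = cat
--         lbl = cat.get("label", "").strip().lower()
--         if lbl not in by_label:
--             by_label[lbl] = cat
--     hit = by_id.get(v)
--     if hit is None:
--         hit = by_label.get(v.lower())
--     return hit
-- ===== Notes on version B (the rewrite author's own statement) =====
-- stated objective: alternative
-- what changed: A's two sequential scans are replaced by building two first-wins hash indexes (by id and by normalized label) in one pass followed by two O(1) lookups; same asymptotic cost for a single query, but a different data structure and traversal.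
import Mathlib
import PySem

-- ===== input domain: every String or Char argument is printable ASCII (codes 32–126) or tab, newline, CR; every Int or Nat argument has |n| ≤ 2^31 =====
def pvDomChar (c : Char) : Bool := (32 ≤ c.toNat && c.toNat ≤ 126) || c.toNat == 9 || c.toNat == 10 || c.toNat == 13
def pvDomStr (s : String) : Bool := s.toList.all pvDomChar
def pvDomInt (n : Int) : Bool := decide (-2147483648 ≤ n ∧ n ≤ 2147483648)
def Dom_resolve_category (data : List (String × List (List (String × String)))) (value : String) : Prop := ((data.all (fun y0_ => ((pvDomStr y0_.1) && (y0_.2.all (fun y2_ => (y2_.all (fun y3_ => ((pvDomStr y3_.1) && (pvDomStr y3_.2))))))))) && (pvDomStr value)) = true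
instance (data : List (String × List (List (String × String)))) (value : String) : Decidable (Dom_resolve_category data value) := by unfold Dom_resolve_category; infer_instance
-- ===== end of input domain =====

-- B replaces A's two scans with building two first-wins dictionaries (by id, by normalized label) in one pass, then two lookups; same O(n) cost, different data structure.


-- ===== PORT A =====
-- dict access cat[k] / cat.get(k, d) on an association list (first match); the default is
-- only ever reached outside Pre_ (Python raises KeyError there) or where .get supplies it.
def pvGetD (cat : List (String × String)) (k d : String) : String :=
  (cat.lookup k).getD d

-- loop 1 of A: first category whose "id" equals v
def pvFindId (cats : List (List (String × String))) (v : String) : Option (List (String × String)) :=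
  match cats with
  | [] => none
  | c :: rest => if pvGetD c "id" "" = v then some c else pvFindId rest v

-- loop 2 of A: first category whose stripped lowercased "label" equals v_lower
def pvFindLabel (cats : List (List (String × String))) (vl : String) : Option (List (String × String)) :=
  match cats with
  | [] => none
  | c :: rest => if PySem.Str.lower (PySem.Str.strip (pvGetD c "label" "")) = vl then some c else pvFindLabel rest vl

def resolve_category (data : List (String × List (List (String × String)))) (value : String) : Option (List (String × String)) :=
  let v := PySem.Str.strip value
  if v = "" then none
  else
    let cats := (data.lookup "categories").getD []
    match pvFindId cats v with
    | some c => some c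
    | none => pvFindLabel cats (PySem.Str.lower v)

-- ===== PORT B =====
-- B's indexing loop: one pass filling the by_id and by_label dictionaries (first key wins,
-- mirroring Python's 'if k not in d: d[k] = cat')
def pvBuildIndex (cats : List (List (String × String)))
    (byId byLabel : PySem.Dict String (List (String × String))) :
    PySem.Dict String (List (String × String)) × PySem.Dict String (List (String × String)) :=
  match cats with
  | [] => (byId, byLabel)
  | c :: rest =>
    let k := (c.lookup "id").getD ""
    let byId' := if byId.contains k then byId else byId.insert k c
    let lbl := PySem.Str.lower (PySem.Str.strip ((c.lookup "label").getD ""))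
    let byLabel' := if byLabel.contains lbl then byLabel else byLabel.insert lbl c
    pvBuildIndex rest byId' byLabel'

def resolve_category_alt (data : List (String × List (List (String × String)))) (value : String) : Option (List (String × String)) :=
  let v := PySem.Str.strip value
  if v = "" then none
  else
    let m := pvBuildIndex ((data.lookup "categories").getD []) PySem.Dict.empty PySem.Dict.empty
    match m.1.get? v with
    | some c => some c
    | none => m.2.get? (PySem.Str.lower v)

-- ===== PRECONDITION & SPEC =====
-- Pre_ excludes exactly the inputs where Python A raises KeyError: a missing "categories" key
-- (when the stripped value is nonempty), or a category without an "id" key that A's first scan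
-- reaches before any ID match.
def Pre_resolve_category (data : List (String × List (List (String × String)))) (value : String) : Prop :=
  PySem.Str.strip value = "" ∨
    ((data.lookup "categories").isSome = true ∧
     ∀ i < ((data.lookup "categories").getD []).length,
       (∀ j < i, ((((data.lookup "categories").getD []).getD j []).lookup "id").getD "" ≠ PySem.Str.strip value) →
       ((((data.lookup "categories").getD []).getD i []).lookup "id").isSome = true)
instance (data : List (String × List (List (String × String)))) (value : String) : Decidable (Pre_resolve_category data value) := by unfold Pre_resolve_category; infer_instance

def pvWitness_resolve_category : (List (String × List (List (String × String)))) × String :=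
  ([("categories", [[("id", "a"), ("label", "Alpha")]])], "ALPHA")

def Spec_resolve_category (data : List (String × List (List (String × String)))) (value : String) (out : Option (List (String × String))) : Prop := out = resolve_category_alt data value
instance (data : List (String × List (List (String × String)))) (value : String) (out : Option (List (String × String))) : Decidable (Spec_resolve_category data value out) := by unfold Spec_resolve_category; infer_instance

-- ===== CLAIM (what is proved, stated in full; the proofs are below) =====
def Claim_equal_resolve_category : Prop := ∀ (data : List (String × List (List (String × String)))) (value : String), Dom_resolve_category data value → Pre_resolve_category data value → Spec_resolve_category data value (resolve_category data value)

-- ===== LEMMAS AND PROOFS =====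

-- the by_id index looks up as: the start dict first, else A's first-ID-match scan
theorem pvBuildIndex_fst_get? (cats : List (List (String × String)))
    (byId byLabel : PySem.Dict String (List (String × String))) (x : String) :
    (pvBuildIndex cats byId byLabel).1.get? x = (byId.get? x).or (pvFindId cats x) := by
  induction cats generalizing byId byLabel with
  | nil => simp [pvBuildIndex, pvFindId]
  | cons c rest ih =>
    simp only [pvBuildIndex, pvFindId, ih]
    by_cases hc : byId.contains ((c.lookup "id").getD "") = true
    · simp only [hc, if_true]
      by_cases hx : pvGetD c "id" "" = x
      · have hs : (byId.get? x).isSome := by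
          rw [← hx]
          simpa [PySem.Dict.contains_eq_isSome_get?] using hc
        cases h : byId.get? x with
        | none => rw [h] at hs; simp at hs
        | some w => simp [hx]
      · simp [hx]
    · simp only [Bool.not_eq_true] at hc
      simp only [hc, Bool.false_eq_true, if_false]
      by_cases hx : x = (c.lookup "id").getD ""
      · have hn : byId.get? x = none := by
          rw [hx]
          rcases h : byId.get? ((c.lookup "id").getD "") with _ | w
          · rfl
          · have := PySem.Dict.contains_eq_isSome_get? (d := byId) (k := (c.lookup "id").getD "")
            rw [h] at this; rw [this] at hc; simp at hc
        rw [PySem.Dict.get?_insert, if_pos hx, hn]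
        have : pvGetD c "id" "" = x := by simpa [pvGetD] using hx.symm
        simp [this]
      · rw [PySem.Dict.get?_insert, if_neg hx]
        have : pvGetD c "id" "" ≠ x := by simpa [pvGetD] using fun h => hx h.symm
        simp [this]

-- the by_label index looks up as: the start dict first, else A's first-label-match scan
theorem pvBuildIndex_snd_get? (cats : List (List (String × String)))
    (byId byLabel : PySem.Dict String (List (String × String))) (x : String) :
    (pvBuildIndex cats byId byLabel).2.get? x = (byLabel.get? x).or (pvFindLabel cats x) := by
  induction cats generalizing byId byLabel with
  | nil => simp [pvBuildIndex, pvFindLabel]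
  | cons c rest ih =>
    simp only [pvBuildIndex, pvFindLabel, ih]
    by_cases hc : byLabel.contains (PySem.Str.lower (PySem.Str.strip ((c.lookup "label").getD ""))) = true
    · simp only [hc, if_true]
      by_cases hx : PySem.Str.lower (PySem.Str.strip (pvGetD c "label" "")) = x
      · have hs : (byLabel.get? x).isSome := by
          rw [← hx]
          simpa [PySem.Dict.contains_eq_isSome_get?, pvGetD] using hc
        cases h : byLabel.get? x with
        | none => rw [h] at hs; simp at hs
        | some w => simp [hx]
      · simp [hx]
    · simp only [Bool.not_eq_true] at hc
      simp only [hc, Bool.false_eq_true, if_false]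
      by_cases hx : x = PySem.Str.lower (PySem.Str.strip ((c.lookup "label").getD ""))
      · have hn : byLabel.get? x = none := by
          rw [hx]
          rcases h : byLabel.get? (PySem.Str.lower (PySem.Str.strip ((c.lookup "label").getD ""))) with _ | w
          · rfl
          · have := PySem.Dict.contains_eq_isSome_get? (d := byLabel) (k := PySem.Str.lower (PySem.Str.strip ((c.lookup "label").getD "")))
            rw [h] at this; rw [this] at hc; simp at hc
        rw [PySem.Dict.get?_insert, if_pos hx, hn]
        have : PySem.Str.lower (PySem.Str.strip (pvGetD c "label" "")) = x := by
          simpa [pvGetD] using hx.symm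
        simp [this]
      · rw [PySem.Dict.get?_insert, if_neg hx]
        have : PySem.Str.lower (PySem.Str.strip (pvGetD c "label" "")) ≠ x := by
          simpa [pvGetD] using fun h => hx h.symm
        simp [this]

theorem resolve_category_eq_alt (data : List (String × List (List (String × String)))) (value : String) :
    resolve_category data value = resolve_category_alt data value := by
  unfold resolve_category resolve_category_alt
  by_cases hv : PySem.Str.strip value = ""
  · simp [hv]
  · simp only [hv, if_false, pvBuildIndex_fst_get?, pvBuildIndex_snd_get?,
      PySem.Dict.get?_empty, Option.none_or]

-- ===== VERDICT (by name: the statement is the Claim_ definition above) =====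
theorem resolve_category_spec : Claim_equal_resolve_category := by
  intro data value _ _
  exact resolve_category_eq_alt data value
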